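-- pv_equiv track=rewrite | github.com/jahyunlee00299/ASMC | asmc/active_site_extractor.py | extract_sites_from_alignment
-- ===== SOURCE A (Python) =====
-- from typing import List, Dict, Tuple, Optional, Union
--
-- def extract_sites_from_alignment(
--                                  aligned_ref: str,
--                                  aligned_target: str,
--                                  ref_residue_numbers: List[int],
--                                  active_positions: List[int]) -> str:
--     """
--     Extract active site residues from aligned sequences.
--
--     Args:
--         aligned_ref: Aligned reference sequence
--         aligned_target: Aligned target sequence
--         ref_residue_numbers: Residue numbers in reference
--         active_positions: Active site positions in reference numbering
--
--     Returns:
--         String of active site residues from target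
--     """
--     # Map alignment positions to reference residue numbers
--     ref_pos_to_resnum = {}
--     ref_idx = 0
--
--     for aln_idx, char in enumerate(aligned_ref):
--         if char != '-':
--             ref_pos_to_resnum[aln_idx] = ref_residue_numbers[ref_idx]
--             ref_idx += 1
--
--     # Extract active site residues from target
--     active_site_residues = []
--     for aln_idx, resnum in ref_pos_to_resnum.items():
--         if resnum in active_positions:
--             target_aa = aligned_target[aln_idx]
--             active_site_residues.append(target_aa if target_aa != '-' else 'X')
--
--     return ''.join(active_site_residues)
-- ===== SOURCE B (Python) =====
-- def extract_sites_from_alignment(aligned_ref, aligned_target, ref_residue_numbers, active_positions):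
--     # One fused pass: co-iterate reference and target characters with zip,
--     # drawing residue numbers from an iterator at each non-gap reference
--     # position; no intermediate dict, no enumerate, no index arithmetic.
--     nums = iter(ref_residue_numbers)
--     out = []
--     for r, t in zip(aligned_ref, aligned_target):
--         if r != '-' and next(nums) in active_positions:
--             out.append('X' if t == '-' else t)
--     return ''.join(out)
-- ===== Notes on version B (the rewrite author's own statement) =====
-- stated objective: simpler
-- what changed: B fuses A's two staged passes (building an alignment-index -> residue-number dict, then iterating its items with indexed target lookups) into one co-iteration over zip(aligned_ref, aligned_target) that draws residue numbers from an iterator at each non-gap reference character, with no intermediate dict and no indexing at all.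
import Mathlib
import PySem

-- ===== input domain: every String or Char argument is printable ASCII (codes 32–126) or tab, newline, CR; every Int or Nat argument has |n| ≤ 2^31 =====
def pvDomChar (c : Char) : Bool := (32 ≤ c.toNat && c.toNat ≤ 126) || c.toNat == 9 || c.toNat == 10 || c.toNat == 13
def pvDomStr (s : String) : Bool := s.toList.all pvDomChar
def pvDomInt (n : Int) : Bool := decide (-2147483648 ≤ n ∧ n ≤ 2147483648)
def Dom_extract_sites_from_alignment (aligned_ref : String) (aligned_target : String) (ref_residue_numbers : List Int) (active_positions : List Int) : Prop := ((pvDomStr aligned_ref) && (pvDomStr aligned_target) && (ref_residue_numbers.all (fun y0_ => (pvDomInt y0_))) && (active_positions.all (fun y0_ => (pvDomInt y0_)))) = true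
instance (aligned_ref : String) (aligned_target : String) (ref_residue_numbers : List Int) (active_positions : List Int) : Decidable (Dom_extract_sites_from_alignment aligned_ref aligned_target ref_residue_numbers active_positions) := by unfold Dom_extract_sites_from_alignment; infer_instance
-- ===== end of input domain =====

-- B fuses A's two staged passes (dict build, then extraction) into one co-iteration
-- over the zipped sequences with an iterator of residue numbers (objective: simpler).


-- ===== PORT A =====
-- First loop of A: builds the insertion-ordered dict {aln_idx: ref_residue_numbers[ref_idx]}
-- (keys strictly increasing, so the assoc list in build order IS the dict in insertion order).
-- The `getD … 0` default is never reached under Pre_ (Python raises IndexError there).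
def pvA_phase1 : List Char → Nat → Nat → List Int → List (Int × Int)
  | [], _, _, _ => []
  | c :: rest, aln, ridx, rrn =>
    if c ≠ '-' then (Int.ofNat aln, rrn.getD ridx 0) :: pvA_phase1 rest (aln + 1) (ridx + 1) rrn
    else pvA_phase1 rest (aln + 1) ridx rrn

-- Second loop of A over the dict items; `getD … '?'` is never reached under Pre_ (IndexError).
def pvA_phase2 : List (Int × Int) → List Char → List Int → List Char
  | [], _, _ => []
  | (aln, resnum) :: rest, tgt, act =>
    if resnum ∈ act then
      (if tgt.getD aln.toNat '?' ≠ '-' then tgt.getD aln.toNat '?' else 'X') :: pvA_phase2 rest tgt act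
    else pvA_phase2 rest tgt act

def extract_sites_from_alignment (aligned_ref : String) (aligned_target : String) (ref_residue_numbers : List Int) (active_positions : List Int) : String :=
  String.ofList (pvA_phase2 (pvA_phase1 aligned_ref.toList 0 0 ref_residue_numbers) aligned_target.toList active_positions)

-- ===== PORT B =====
-- B's single fused loop: `for r, t in zip(aligned_ref, aligned_target)` with
-- `next(nums)` consumed at each non-gap r.  The `[]` branch for exhausted nums is
-- Python's StopIteration, unreachable under Pre_.
def pvB_go (act : List Int) : List Char → List Char → List Int → List Char
  | [], _, _ => []
  | _ :: _, [], _ => []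
  | r :: ref, t :: tgt, nums =>
    if r ≠ '-' then
      match nums with
      | [] => []   -- next() raises StopIteration here; outside Pre_
      | n :: rest =>
        if n ∈ act then (if t = '-' then 'X' else t) :: pvB_go act ref tgt rest
        else pvB_go act ref tgt rest
    else pvB_go act ref tgt nums

def extract_sites_from_alignment_alt (aligned_ref : String) (aligned_target : String) (ref_residue_numbers : List Int) (active_positions : List Int) : String :=
  String.ofList (pvB_go active_positions aligned_ref.toList aligned_target.toList ref_residue_numbers)

-- ===== PRECONDITION & SPEC =====
def pvNonGaps (l : List Char) : Nat := (l.filter (fun c => c ≠ '-')).length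

-- Exactly the inputs on which Python A returns: the reference has no more non-gap characters
-- than residue numbers (else ref_residue_numbers[ref_idx] raises IndexError), and every
-- selected (non-gap, active-residue-number) alignment index is inside aligned_target
-- (else aligned_target[aln_idx] raises IndexError).
def Pre_extract_sites_from_alignment (aligned_ref : String) (aligned_target : String) (ref_residue_numbers : List Int) (active_positions : List Int) : Prop :=
  pvNonGaps aligned_ref.toList ≤ ref_residue_numbers.length ∧
  ∀ i ∈ List.range aligned_ref.toList.length,
    (aligned_ref.toList.getD i ' ' ≠ '-' ∧ ref_residue_numbers.getD (pvNonGaps (aligned_ref.toList.take i)) 0 ∈ active_positions) →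
      i < aligned_target.toList.length

instance (aligned_ref : String) (aligned_target : String) (ref_residue_numbers : List Int) (active_positions : List Int) : Decidable (Pre_extract_sites_from_alignment aligned_ref aligned_target ref_residue_numbers active_positions) := by unfold Pre_extract_sites_from_alignment; infer_instance

def pvWitness_extract_sites_from_alignment : String × String × List Int × List Int := ("A-B", "C-D", [1, 2], [2])

def Spec_extract_sites_from_alignment (aligned_ref : String) (aligned_target : String) (ref_residue_numbers : List Int) (active_positions : List Int) (out : String) : Prop := out = extract_sites_from_alignment_alt aligned_ref aligned_target ref_residue_numbers active_positions
instance (aligned_ref : String) (aligned_target : String) (ref_residue_numbers : List Int) (active_positions : List Int) (out : String) : Decidable (Spec_extract_sites_from_alignment aligned_ref aligned_target ref_residue_numbers active_positions out) := by unfold Spec_extract_sites_from_alignment; infer_instance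

-- ===== CLAIM (what is proved, stated in full; the proofs are below) =====
def Claim_equal_extract_sites_from_alignment : Prop := ∀ (aligned_ref : String) (aligned_target : String) (ref_residue_numbers : List Int) (active_positions : List Int), Dom_extract_sites_from_alignment aligned_ref aligned_target ref_residue_numbers active_positions → Pre_extract_sites_from_alignment aligned_ref aligned_target ref_residue_numbers active_positions → Spec_extract_sites_from_alignment aligned_ref aligned_target ref_residue_numbers active_positions (extract_sites_from_alignment aligned_ref aligned_target ref_residue_numbers active_positions)

-- ===== LEMMAS AND PROOFS =====

-- B with an exhausted target returns [] whatever remains of the reference.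
lemma pvB_go_nil_tgt (act : List Int) : ∀ (ref : List Char) (nums : List Int), pvB_go act ref [] nums = [] := by
  intro ref nums; cases ref <;> simp [pvB_go]

-- Every entry of A's dict: its key is aln + i for a non-gap position i, its value the
-- corresponding residue number.
lemma pv_phase1_mem (rrn : List Int) : ∀ (ref : List Char) (aln ridx : Nat) (p : Int × Int),
    p ∈ pvA_phase1 ref aln ridx rrn →
    ∃ i, i < ref.length ∧ ref.getD i ' ' ≠ '-' ∧ p.1 = Int.ofNat (aln + i) ∧
      p.2 = rrn.getD (ridx + pvNonGaps (ref.take i)) 0 := by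
  intro ref
  induction ref with
  | nil => intro _ _ _ h; simp [pvA_phase1] at h
  | cons c rest ih =>
    intro aln ridx p h
    by_cases hc : c = '-'
    · subst hc
      simp only [pvA_phase1, ne_eq, not_true_eq_false, if_false] at h
      obtain ⟨i, hi, hg, h1, h2⟩ := ih (aln + 1) ridx p h
      refine ⟨i + 1, by simpa using hi, by simpa using hg, ?_, ?_⟩
      · rw [h1]; congr 1; omega
      · simpa [pvNonGaps] using h2
    · simp only [pvA_phase1, if_pos (hc : c ≠ '-')] at h
      rcases List.mem_cons.mp h with hhd | htl
      · exact ⟨0, by simp, by simpa [hhd] using hc, by simp [hhd], by simp [hhd, pvNonGaps]⟩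
      · obtain ⟨i, hi, hg, h1, h2⟩ := ih (aln + 1) (ridx + 1) p htl
        refine ⟨i + 1, by simpa using hi, by simpa using hg, ?_, ?_⟩
        · rw [h1]; congr 1; omega
        · have ht : pvNonGaps (List.take (i + 1) (c :: rest)) = pvNonGaps (List.take i rest) + 1 := by
            simp [pvNonGaps, hc]
          rw [h2, ht]
          congr 1
          omega

-- Main bridge: A's two staged passes equal B's fused pass, generalized over the
-- running alignment index and residue-number consumption.
lemma pv_key (tgt : List Char) (rrn act : List Int) :
    ∀ (ref : List Char) (aln ridx : Nat),
      pvNonGaps ref + ridx ≤ rrn.length →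
      (∀ p ∈ pvA_phase1 ref aln ridx rrn, p.2 ∈ act → p.1.toNat < tgt.length) →
      pvA_phase2 (pvA_phase1 ref aln ridx rrn) tgt act
        = pvB_go act ref (tgt.drop aln) (rrn.drop ridx) := by
  intro ref
  induction ref with
  | nil => intro aln ridx _ _; simp [pvA_phase1, pvA_phase2, pvB_go]
  | cons c rest ih =>
    intro aln ridx hlen hsel
    have hdrop1 : tgt.drop (aln + 1) = (tgt.drop aln).tail := by
      rw [← List.drop_drop]; simp
    by_cases hc : c = '-'
    · subst hc
      simp only [pvA_phase1, ne_eq, not_true_eq_false, if_false]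
      have h := ih (aln + 1) ridx (by simpa [pvNonGaps] using hlen)
        (by intro p hp; exact hsel p (by simpa [pvA_phase1] using hp))
      rw [h]
      cases htg : tgt.drop aln with
      | nil => rw [hdrop1, htg]; simp [pvB_go, pvB_go_nil_tgt]
      | cons t ts => rw [hdrop1, htg]; simp [pvB_go]
    · have hridx : ridx < rrn.length := by
        have : pvNonGaps (c :: rest) = pvNonGaps rest + 1 := by simp [pvNonGaps, hc]
        omega
      have hA1 : pvA_phase1 (c :: rest) aln ridx rrn
          = (Int.ofNat aln, rrn.getD ridx 0) :: pvA_phase1 rest (aln + 1) (ridx + 1) rrn := by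
        simp [pvA_phase1, hc]
      have hgetD : rrn.getD ridx 0 = rrn[ridx] := List.getD_eq_getElem rrn 0 hridx
      have hdropr : rrn.drop ridx = rrn[ridx] :: rrn.drop (ridx + 1) :=
        List.drop_eq_getElem_cons hridx
      have hng : pvNonGaps (c :: rest) = pvNonGaps rest + 1 := by simp [pvNonGaps, hc]
      have hrec := ih (aln + 1) (ridx + 1) (by omega)
        (by intro p hp hm; exact hsel p (by rw [hA1]; exact List.mem_cons_of_mem _ hp) hm)
      by_cases hm : rrn[ridx] ∈ act
      · have haln : aln < tgt.length := by
          have := hsel (Int.ofNat aln, rrn.getD ridx 0) (by rw [hA1]; exact List.mem_cons_self) (by rwa [hgetD])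
          simpa using this
        have htg : tgt.drop aln = tgt[aln] :: tgt.drop (aln + 1) := List.drop_eq_getElem_cons haln
        have hgt : tgt.getD aln '?' = tgt[aln] := List.getD_eq_getElem tgt '?' haln
        rw [hA1]
        simp only [pvA_phase2, hgetD, if_pos hm]
        have htn : (Int.ofNat aln).toNat = aln := Int.toNat_natCast aln
        rw [htn, hgt, htg, hdropr]
        simp only [pvB_go, if_pos (hc : c ≠ '-'), if_pos hm]
        rw [hrec]
        by_cases hch : tgt[aln] = '-' <;> simp [hch]
      · rw [hA1]
        simp only [pvA_phase2, hgetD, if_neg hm, hdropr]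
        cases htg : tgt.drop aln with
        | nil =>
          have h2 : tgt.drop (aln + 1) = [] := by rw [hdrop1, htg]; rfl
          rw [hrec, h2]
          simp [pvB_go, pvB_go_nil_tgt]
        | cons t ts =>
          have h2 : tgt.drop (aln + 1) = ts := by rw [hdrop1, htg]; rfl
          simp only [pvB_go, if_pos (hc : c ≠ '-'), if_neg hm]
          rw [hrec, h2]

-- ===== VERDICT (by name: the statement is the Claim_ definition above) =====
theorem extract_sites_from_alignment_spec : Claim_equal_extract_sites_from_alignment := by
  intro ar at_ rrn act _ hPre
  unfold Spec_extract_sites_from_alignment extract_sites_from_alignment extract_sites_from_alignment_alt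
  have hsel : ∀ p ∈ pvA_phase1 ar.toList 0 0 rrn, p.2 ∈ act → p.1.toNat < at_.toList.length := by
    intro p hp hm
    obtain ⟨i, hi, hg, h1, h2⟩ := pv_phase1_mem rrn ar.toList 0 0 p hp
    simp only [Nat.zero_add] at h1 h2
    have := hPre.2 i (List.mem_range.mpr hi) ⟨hg, h2 ▸ hm⟩
    simpa [h1] using this
  have h := pv_key at_.toList rrn act ar.toList 0 0 (by simpa using hPre.1) hsel
  simp only [List.drop_zero] at h
  exact congrArg String.ofList h
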